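-- pv_equiv track=rewrite | github.com/mozilla/experimenter | app/experimenter/visualization/api/v3/views.py | get_other_metrics_names_and_map
-- ===== SOURCE A (Python) =====
-- class Statistic:
--     PERCENT = "percentage"
--     BINOMIAL = "binomial"
--     MEAN = "mean"
--     COUNT = "count"
--
-- def get_other_metrics_names_and_map(data, RESULTS_METRICS_MAP):
--     # These are metrics sent from Jetstream that are not explicitly chosen
--     # by users to be either primary or secondary
--     other_metrics_names = {}
--     other_metrics_map = {}
--
--     # This is an ordered list of priorities of stats to graph
--     priority_stats = [Statistic.MEAN, Statistic.BINOMIAL]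
--     other_data = [
--         data_point
--         for data_point in data
--         if data_point["metric"] not in RESULTS_METRICS_MAP
--     ]
--     for row in other_data:
--         metric = row.get("metric")
--         statistic = row.get("statistic")
--
--         if statistic in priority_stats:
--             metric_title = " ".join([word.title() for word in metric.split("_")])
--             other_metrics_names[metric] = metric_title
--
--             if metric not in other_metrics_map or priority_stats.index(
--                 statistic
--             ) < priority_stats.index(other_metrics_map[metric]):
--                 other_metrics_map[metric] = statistic
--
--     # Turn other_metrics_map into the format needed
--     # by get_result_metrics_map()
--     other_metrics_map = {k: set([v]) for k, v in other_metrics_map.items()}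
--
--     return other_metrics_map, other_metrics_names
-- ===== SOURCE B (Python) =====
-- def get_other_metrics_names_and_map(data, RESULTS_METRICS_MAP):
--     # Extract a flat list of (metric, statistic) priority pairs, then build
--     # both dicts by comprehensions over the deduplicated metric order.
--     pairs = [
--         (row["metric"], row.get("statistic"))
--         for row in data
--         if row["metric"] not in RESULTS_METRICS_MAP
--         and row.get("statistic") in ("mean", "binomial")
--     ]
--     metrics = list(dict.fromkeys(m for m, _ in pairs))
--     other_metrics_names = {
--         m: " ".join(w.title() for w in m.split("_")) for m in metrics
--     }
--     other_metrics_map = {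
--         m: {"mean"} if any(s == "mean" for mm, s in pairs if mm == m) else {"binomial"}
--         for m in metrics
--     }
--     return other_metrics_map, other_metrics_names
-- ===== Notes on version B (the rewrite author's own statement) =====
-- stated objective: simpler
-- what changed: A threads two dicts through one loop with an incremental compare-priority-index-and-overwrite best-so-far per metric; B is a staged pipeline: extract the flat list of priority (metric, statistic) pairs, dedup the metric order with dict.fromkeys, then build both result dicts by comprehensions, deciding each metric's statistic by whether 'mean' occurs among its pairs.
import Mathlib
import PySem

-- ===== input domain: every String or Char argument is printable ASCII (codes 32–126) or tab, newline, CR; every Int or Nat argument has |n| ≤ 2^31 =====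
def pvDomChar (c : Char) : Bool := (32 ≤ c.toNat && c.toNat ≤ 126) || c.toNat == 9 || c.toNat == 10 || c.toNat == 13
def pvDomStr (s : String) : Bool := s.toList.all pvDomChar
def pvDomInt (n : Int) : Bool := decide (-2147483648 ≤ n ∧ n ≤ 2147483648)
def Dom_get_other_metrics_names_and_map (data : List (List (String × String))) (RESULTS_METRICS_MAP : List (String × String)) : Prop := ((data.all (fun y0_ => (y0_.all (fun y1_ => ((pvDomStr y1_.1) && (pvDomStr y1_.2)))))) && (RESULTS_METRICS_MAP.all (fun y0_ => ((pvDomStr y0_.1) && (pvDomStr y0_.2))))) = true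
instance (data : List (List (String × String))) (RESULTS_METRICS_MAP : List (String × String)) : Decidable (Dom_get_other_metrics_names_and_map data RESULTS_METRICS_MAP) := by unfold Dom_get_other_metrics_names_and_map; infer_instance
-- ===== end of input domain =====

-- B replaces A's filter-then-incremental-best-so-far dict loop by a staged pipeline: extract the
-- flat list of priority (metric, statistic) pairs, dedup the metric order, then build both dicts
-- by comprehensions (mean-membership decides each metric's statistic); objective: simpler, not faster.

-- ===== PORT A =====
-- shared helpers: the priority list, its .index, word.title() (exact on ASCII: cased = alpha),
-- the " ".join(title(words)) expression, and row lookups (each Python row dict is an assoc list)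
def pvPriority : List String := ["mean", "binomial"]

def pvIdx (s : String) : Nat := (PySem.List.index? pvPriority s).getD 0

def pvTitleChars : List Char → Bool → List Char
  | [], _ => []
  | c :: cs, prev =>
    if PySem.Chars.isalpha c then
      (if prev then PySem.Chars.lowerChar c else PySem.Chars.upperChar c) :: pvTitleChars cs true
    else c :: pvTitleChars cs false

def pvTitleWord (w : String) : String := String.ofList (pvTitleChars w.toList false)

def pvMetricTitle (m : String) : String :=
  -- " ".join([word.title() for word in metric.split("_")]); split? is total here (sep ≠ "")
  PySem.Str.join " " (((PySem.Str.split? m "_").getD []).map pvTitleWord)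

def pvRowMetric (row : List (String × String)) : String :=
  ((PySem.Dict.ofList row).get? "metric").getD ""   -- getD "" unreachable under Pre_

def pvRowStat? (row : List (String × String)) : Option String :=
  (PySem.Dict.ofList row).get? "statistic"

def pvKeep (RMMd : PySem.Dict String String) (row : List (String × String)) : Bool :=
  !RMMd.contains (pvRowMetric row)

-- A's loop over other_data, threading (other_metrics_names, other_metrics_map)
def pvALoop (rows : List (List (String × String)))
    (names omap : PySem.Dict String String) :
    PySem.Dict String String × PySem.Dict String String :=
  match rows with
  | [] => (names, omap)
  | row :: rest =>
    let metric := pvRowMetric row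
    match pvRowStat? row with
    | some s =>
      if pvPriority.contains s then
        pvALoop rest (names.insert metric (pvMetricTitle metric))
          (if !omap.contains metric || decide (pvIdx s < pvIdx (omap.getD metric "")) then
            omap.insert metric s
          else omap)
      else pvALoop rest names omap
    | none => pvALoop rest names omap

def get_other_metrics_names_and_map (data : List (List (String × String))) (RESULTS_METRICS_MAP : List (String × String)) : (List (String × List String)) × (List (String × String)) :=
  let RMMd := PySem.Dict.ofList RESULTS_METRICS_MAP
  let other_data := data.filter (pvKeep RMMd)
  let r := pvALoop other_data PySem.Dict.empty PySem.Dict.empty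
  (r.2.items.map (fun p => (p.1, [p.2])), r.1.items)

-- ===== PORT B =====
-- the pair-list comprehension: (row["metric"], row.get("statistic")) for the kept priority rows
def pvPair? (RMMd : PySem.Dict String String) (row : List (String × String)) :
    Option (String × String) :=
  if !RMMd.contains (pvRowMetric row) then
    match pvRowStat? row with
    | some s => if s == "mean" || s == "binomial" then some (pvRowMetric row, s) else none
    | none => none
  else none

def get_other_metrics_names_and_map_alt (data : List (List (String × String))) (RESULTS_METRICS_MAP : List (String × String)) : (List (String × List String)) × (List (String × String)) :=
  let RMMd := PySem.Dict.ofList RESULTS_METRICS_MAP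
  let pairs := data.filterMap (pvPair? RMMd)
  let metrics := PySem.List.dedup (pairs.map Prod.fst)     -- list(dict.fromkeys(...))
  -- the two dict comprehensions over metrics
  let names := metrics.foldl (fun d m => d.insert m (pvMetricTitle m)) PySem.Dict.empty
  let omap := metrics.foldl (fun d m =>
      d.insert m (if pairs.any (fun p => p.1 == m && p.2 == "mean") then ["mean"]
                  else ["binomial"]))
    PySem.Dict.empty
  (omap.items, names.items)

-- ===== PRECONDITION & SPEC =====
-- Pre_ excludes only rows without a "metric" key: there data_point["metric"] raises KeyError in A.
def Pre_get_other_metrics_names_and_map (data : List (List (String × String))) (RESULTS_METRICS_MAP : List (String × String)) : Prop :=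
  ∀ row ∈ data, "metric" ∈ row.map Prod.fst
instance (data : List (List (String × String))) (RESULTS_METRICS_MAP : List (String × String)) : Decidable (Pre_get_other_metrics_names_and_map data RESULTS_METRICS_MAP) := by unfold Pre_get_other_metrics_names_and_map; infer_instance

def pvWitness_get_other_metrics_names_and_map : (List (List (String × String))) × (List (String × String)) :=
  ([[("metric", "a_b"), ("statistic", "mean")], [("metric", "c"), ("statistic", "binomial")]], [("x", "y")])

def Spec_get_other_metrics_names_and_map (data : List (List (String × String))) (RESULTS_METRICS_MAP : List (String × String)) (out : (List (String × List String)) × (List (String × String))) : Prop := out = get_other_metrics_names_and_map_alt data RESULTS_METRICS_MAP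
instance (data : List (List (String × String))) (RESULTS_METRICS_MAP : List (String × String)) (out : (List (String × List String)) × (List (String × String))) : Decidable (Spec_get_other_metrics_names_and_map data RESULTS_METRICS_MAP out) := by unfold Spec_get_other_metrics_names_and_map; infer_instance

-- ===== CLAIM (what is proved, stated in full; the proofs are below) =====
def Claim_equal_get_other_metrics_names_and_map : Prop := ∀ (data : List (List (String × String))) (RESULTS_METRICS_MAP : List (String × String)), Dom_get_other_metrics_names_and_map data RESULTS_METRICS_MAP → Pre_get_other_metrics_names_and_map data RESULTS_METRICS_MAP → Spec_get_other_metrics_names_and_map data RESULTS_METRICS_MAP (get_other_metrics_names_and_map data RESULTS_METRICS_MAP)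

-- ===== LEMMAS AND PROOFS =====

-- the statistic B's comprehension selects for a metric, as a String
def pvBest (pairs : List (String × String)) (m : String) : String :=
  if pairs.any (fun p => p.1 == m && p.2 == "mean") then "mean" else "binomial"

theorem pvBest_vals (P : List (String × String)) (m : String) :
    pvBest P m = "mean" ∨ pvBest P m = "binomial" := by
  unfold pvBest; split <;> simp

theorem pvBest_append_singleton (P : List (String × String)) (m s m' : String) :
    pvBest (P ++ [(m, s)]) m' = if m = m' ∧ s = "mean" then "mean" else pvBest P m' := by
  unfold pvBest
  by_cases hms : m = m' ∧ s = "mean"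
  · simp [List.any_append, hms.1, hms.2]
  · have : ((m == m') && (s == "mean")) = false := by
      rcases Decidable.not_and_iff_or_not.mp hms with h | h <;> simp [h]
    simp [List.any_append, this, hms]

theorem pvBest_of_not_mem (P : List (String × String)) (m : String)
    (h : m ∉ P.map Prod.fst) : pvBest P m = "binomial" := by
  unfold pvBest
  have : P.any (fun p => p.1 == m && p.2 == "mean") = false := by
    simp only [List.any_eq_false]
    intro p hp
    simp only [Bool.and_eq_true, beq_iff_eq, not_and]
    intro h1 _
    exact h (List.mem_map.mpr ⟨p, hp, h1⟩)
  simp [this]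

-- keys / contains / getD of a dict whose items are a known map over a key list
theorem pvKeys_of_items {ν : Type} (d : PySem.Dict String ν) (L : List String) (f : String → ν)
    (h : d.items = L.map (fun x => (x, f x))) : d.keys = L := by
  simp only [PySem.Dict.keys, h, List.map_map]
  exact List.map_congr_left (fun x _ => rfl) |>.trans (List.map_id _)

theorem pvContains_of_items {ν : Type} (d : PySem.Dict String ν) (L : List String) (f : String → ν)
    (h : d.items = L.map (fun x => (x, f x))) (m : String) :
    d.contains m = true ↔ m ∈ L := by
  rw [PySem.Dict.contains_iff_mem_keys, pvKeys_of_items d L f h]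

theorem pvGetD_of_items {ν : Type} (d : PySem.Dict String ν) (L : List String) (f : String → ν)
    (h : d.items = L.map (fun x => (x, f x))) (hnd : L.Nodup) (m : String) (hm : m ∈ L) (d0 : ν) :
    d.getD m d0 = f m := by
  refine PySem.Dict.getD_of_mem_items d ?_ ?_ d0
  · rw [h]; exact List.mem_map.mpr ⟨m, hm, rfl⟩
  · rw [pvKeys_of_items d L f h]; exact hnd

-- inserting (m, v): the items stay a map over PySem.Set.add L m, with the value at m replaced
theorem pvItems_insert {ν : Type} (d : PySem.Dict String ν) (L : List String) (f : String → ν)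
    (h : d.items = L.map (fun x => (x, f x))) (m : String) (v : ν) :
    (d.insert m v).items
      = (PySem.Set.add L m).map (fun x => (x, if x = m then v else f x)) := by
  by_cases hm : m ∈ L
  · have hc : d.contains m = true := (pvContains_of_items d L f h m).mpr hm
    have hadd : PySem.Set.add L m = L := by
      simp [PySem.Set.add, PySem.Set.contains, hm]
    rw [PySem.Dict.items_insert_of_contains _ _ hc, h, hadd, List.map_map]
    refine List.map_congr_left ?_
    intro x _
    by_cases hx : x = m <;> simp [hx]
  · have hc : d.contains m = false := by
      rcases h' : d.contains m with _ | _
      · rfl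
      · exact absurd ((pvContains_of_items d L f h m).mp h') hm
    have hadd : PySem.Set.add L m = L ++ [m] := by
      simp [PySem.Set.add, PySem.Set.contains, hm]
    rw [PySem.Dict.items_insert_of_not_contains _ _ hc, h, hadd, List.map_append]
    refine congrArg₂ _ ?_ (by simp)
    refine List.map_congr_left ?_
    intro x hx
    have : x ≠ m := fun he => hm (he ▸ hx)
    simp [this]

-- one A-step on other_metrics_names keeps it canonical
theorem pvNames_step (names : PySem.Dict String String) (L : List String) (m : String)
    (h : names.items = L.map (fun x => (x, pvMetricTitle x))) :
    (names.insert m (pvMetricTitle m)).items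
      = (PySem.Set.add L m).map (fun x => (x, pvMetricTitle x)) := by
  rw [pvItems_insert names L _ h m (pvMetricTitle m)]
  refine List.map_congr_left ?_
  intro x _
  by_cases hx : x = m <;> simp [hx]

-- one A-step on other_metrics_map keeps it canonical for the extended pair list
theorem pvOmap_step (omap : PySem.Dict String String) (P : List (String × String)) (m s : String)
    (hs : s = "mean" ∨ s = "binomial")
    (h : omap.items = (PySem.Set.ofList (P.map Prod.fst)).map (fun x => (x, pvBest P x))) :
    (if !omap.contains m || decide (pvIdx s < pvIdx (omap.getD m "")) then
        omap.insert m s else omap).items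
      = (PySem.Set.ofList ((P ++ [(m, s)]).map Prod.fst)).map
          (fun x => (x, pvBest (P ++ [(m, s)]) x)) := by
  have hL : ((P ++ [(m, s)]).map Prod.fst) = P.map Prod.fst ++ [m] := by simp
  set L := PySem.Set.ofList (P.map Prod.fst) with hLdef
  have hnd : L.Nodup := PySem.Set.nodup_ofList _
  have hset : PySem.Set.ofList ((P ++ [(m, s)]).map Prod.fst) = PySem.Set.add L m := by
    rw [hL]; exact PySem.Set.ofList_append_singleton _ _
  by_cases hm : m ∈ L
  · have hmem : m ∈ P.map Prod.fst := (PySem.Set.mem_ofList _ _).mp hm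
    have hc : omap.contains m = true := (pvContains_of_items omap L _ h m).mpr hm
    have hg : omap.getD m "" = pvBest P m := pvGetD_of_items omap L _ h hnd m hm ""
    have hadd : PySem.Set.add L m = L := by
      simp [PySem.Set.add, PySem.Set.contains, hm]
    by_cases hlt : pvIdx s < pvIdx (omap.getD m "")
    · rw [if_pos (by simp [hlt]), pvItems_insert omap L _ h m s, hset, hadd]
      refine List.map_congr_left ?_
      intro x hx
      rw [pvBest_append_singleton]
      by_cases hx' : x = m
      · subst hx'
        -- the strict priority improvement forces s = "mean" and old best = "binomial"
        rcases hs with rfl | rfl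
        · rcases pvBest_vals P x with hb | hb
          · rw [hg, hb] at hlt; exact absurd hlt (by decide)
          · simp
        · rw [hg] at hlt
          rcases pvBest_vals P x with hb | hb <;> rw [hb] at hlt <;> exact absurd hlt (by decide)
      · have : ¬ (m = x ∧ s = "mean") := fun hc' => hx' hc'.1.symm
        simp [hx', this]
    · rw [if_neg (by simp [hlt, hc]), h, hset, hadd]
      refine List.map_congr_left ?_
      intro x hx
      rw [pvBest_append_singleton]
      by_cases hx' : x = m
      · subst hx'
        rcases hs with rfl | rfl
        · -- s = "mean" and no improvement: old best is already "mean"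
          rcases pvBest_vals P x with hb | hb
          · simp [hb]
          · rw [hg, hb] at hlt; exact absurd (by decide) hlt
        · simp
      · have : ¬ (m = x ∧ s = "mean") := fun hc' => hx' hc'.1.symm
        simp [this]
  · have hmem : m ∉ P.map Prod.fst := fun hc' => hm ((PySem.Set.mem_ofList _ _).mpr hc')
    have hc : omap.contains m = false := by
      rcases h' : omap.contains m with _ | _
      · rfl
      · exact absurd ((pvContains_of_items omap L _ h m).mp h') hm
    rw [if_pos (by simp [hc]), pvItems_insert omap L _ h m s, hset]
    refine List.map_congr_left ?_
    intro x hx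
    rw [pvBest_append_singleton]
    by_cases hx' : x = m
    · subst hx'
      have hb : pvBest P x = "binomial" := pvBest_of_not_mem P x hmem
      rcases hs with rfl | rfl <;> simp [hb]
    · have : ¬ (m = x ∧ s = "mean") := fun hc' => hx' hc'.1.symm
      simp [hx', this]

-- A's loop, started from dicts canonical for the already-seen pairs P, stays canonical
theorem pvALoop_canon (RMMd : PySem.Dict String String) :
    ∀ (rows : List (List (String × String))) (P : List (String × String))
      (names omap : PySem.Dict String String),
      names.items = (PySem.Set.ofList (P.map Prod.fst)).map (fun x => (x, pvMetricTitle x)) →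
      omap.items = (PySem.Set.ofList (P.map Prod.fst)).map (fun x => (x, pvBest P x)) →
      (pvALoop (rows.filter (pvKeep RMMd)) names omap).1.items
        = (PySem.Set.ofList ((P ++ rows.filterMap (pvPair? RMMd)).map Prod.fst)).map
            (fun x => (x, pvMetricTitle x)) ∧
      (pvALoop (rows.filter (pvKeep RMMd)) names omap).2.items
        = (PySem.Set.ofList ((P ++ rows.filterMap (pvPair? RMMd)).map Prod.fst)).map
            (fun x => (x, pvBest (P ++ rows.filterMap (pvPair? RMMd)) x)) := by
  intro rows
  induction rows with
  | nil => intro P names omap hn ho; simpa [pvALoop] using ⟨hn, ho⟩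
  | cons row rest ih =>
    intro P names omap hn ho
    by_cases hc : RMMd.contains (pvRowMetric row) = true
    · have hk : pvKeep RMMd row = false := by simp [pvKeep, hc]
      have hp : pvPair? RMMd row = none := by simp [pvPair?, hc]
      simp only [List.filter_cons, hk, Bool.false_eq_true, if_false, List.filterMap_cons, hp]
      exact ih P names omap hn ho
    · have hk : pvKeep RMMd row = true := by simp [pvKeep, hc]
      have hcf : RMMd.contains (pvRowMetric row) = false := by
        rcases h' : RMMd.contains (pvRowMetric row) with _ | _
        · rfl
        · exact absurd h' hc
      simp only [List.filter_cons, hk, if_true, List.filterMap_cons]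
      cases hst : pvRowStat? row with
      | none =>
        simp only [pvALoop, hst, pvPair?, hcf, Bool.not_false, if_true]
        exact ih P names omap hn ho
      | some s =>
        by_cases hs : s = "mean" ∨ s = "binomial"
        · have hpr : pvPriority.contains s = true := by
            rcases hs with rfl | rfl <;> decide
          have hp : pvPair? RMMd row = some (pvRowMetric row, s) := by
            have : (s == "mean" || s == "binomial") = true := by
              rcases hs with rfl | rfl <;> decide
            simp [pvPair?, hcf, hst, this]
          simp only [pvALoop, hst, hpr, if_true, hp]
          have hassoc : P ++ (pvRowMetric row, s) :: rest.filterMap (pvPair? RMMd)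
              = (P ++ [(pvRowMetric row, s)]) ++ rest.filterMap (pvPair? RMMd) := by
            simp
          rw [hassoc]
          refine ih (P ++ [(pvRowMetric row, s)]) _ _ ?_ ?_
          · have := pvNames_step names (PySem.Set.ofList (P.map Prod.fst)) (pvRowMetric row) hn
            rw [this]
            congr 1
            rw [show ((P ++ [(pvRowMetric row, s)]).map Prod.fst)
                  = P.map Prod.fst ++ [pvRowMetric row] by simp]
            exact (PySem.Set.ofList_append_singleton _ _).symm
          · exact pvOmap_step omap P (pvRowMetric row) s hs ho
        · have hpr : pvPriority.contains s = false := by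
            simp only [pvPriority, List.contains_eq_mem, List.mem_cons,
              decide_eq_false_iff_not]
            tauto
          have hp : pvPair? RMMd row = none := by
            have h1 : (s == "mean") = false := by
              simp only [beq_eq_false_iff_ne, ne_eq]; tauto
            have h2 : (s == "binomial") = false := by
              simp only [beq_eq_false_iff_ne, ne_eq]; tauto
            simp [pvPair?, hcf, hst, h1, h2]
          simp only [pvALoop, hst, hpr, Bool.false_eq_true, if_false, hp]
          exact ih P names omap hn ho

-- a dict comprehension over distinct fresh keys: items are exactly the mapped pairs
theorem pvFoldIns {ν : Type} (L : List String) (hnd : L.Nodup) (v : String → ν) :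
    (L.foldl (fun d m => d.insert m (v m)) PySem.Dict.empty).items
      = L.map (fun m => (m, v m)) := by
  simpa using PySem.Dict.items_foldl_insert_fresh (l := L) (k := fun m => m) (v := v)
    (d := PySem.Dict.empty) (fun _ _ => rfl) (by simpa using hnd)

-- ===== VERDICT (by name: the statement is the Claim_ definition above) =====
theorem get_other_metrics_names_and_map_spec : Claim_equal_get_other_metrics_names_and_map := by
  intro data RMM _ _
  unfold Spec_get_other_metrics_names_and_map
  simp only [get_other_metrics_names_and_map, get_other_metrics_names_and_map_alt]
  obtain ⟨hn, ho⟩ := pvALoop_canon (PySem.Dict.ofList RMM) data [] PySem.Dict.empty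
    PySem.Dict.empty (by rfl) (by rfl)
  simp only [List.nil_append] at hn ho
  have hnd : (PySem.List.dedup (((data.filterMap (pvPair? (PySem.Dict.ofList RMM))).map Prod.fst))).Nodup :=
    PySem.List.nodup_dedup _
  refine Prod.ext ?_ ?_ <;> dsimp only
  · rw [ho, pvFoldIns _ hnd _, PySem.List.dedup_eq_ofList, List.map_map]
    refine List.map_congr_left ?_
    intro x _
    simp only [Function.comp]
    unfold pvBest
    split <;> rfl
  · rw [hn, pvFoldIns _ hnd _, PySem.List.dedup_eq_ofList]
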